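-- pv_equiv track=rewrite | github.com/ssupecial/ps | programmers/lv2/방금그곡.py | solution
-- ===== SOURCE A (Python) =====
-- def time_convert(s):
--     h, m = map(int, s.split(":"))
--     return h * 60 + m
--
-- def convert_shap(s):
--     return (
--         s.replace("C#", "c")
--         .replace("D#", "d")
--         .replace("F#", "f")
--         .replace("G#", "g")
--         .replace("A#", "a")
--         .replace("B#", "b")
--         .replace("E#", "e")
--     )
--
-- def solution(m, musicinfos):
--     arr = []
--     for i, musicinfo in enumerate(musicinfos):
--         start_time, end_time, song, music = musicinfo.split(",")
--         duration = time_convert(end_time) - time_convert(start_time)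
--         music = convert_shap(music)
--         music_len = len(music)
--         if duration > music_len:
--             music = music * (duration // music_len + 1)
--         music = music[:duration]
--
--         arr.append([music, duration, song, i])
--
--     m = convert_shap(m)
--     result = []
--     for music, duration, song, index in arr:
--         if m in music:
--             result.append([duration, index, song])
--     answer = (
--         sorted(result, key=lambda x: (x[0], -x[1]), reverse=True)[0][2]
--         if len(result) != 0
--         else "(None)"
--     )
--
--     return answer
-- ===== SOURCE B (Python) =====
-- REPL = [("C#", "c"), ("D#", "d"), ("F#", "f"), ("G#", "g"),
--         ("A#", "a"), ("B#", "b"), ("E#", "e")]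
--
-- def normalize(s):
--     for old, new in REPL:
--         s = s.replace(old, new)
--     return s
--
-- def minutes(t):
--     parts = t.split(":")
--     return int(parts[0]) * 60 + int(parts[1])
--
-- def played(info):
--     st, et, song, notes = info.split(",")
--     d = minutes(et) - minutes(st)
--     tune = normalize(notes)
--     if len(tune) < d:
--         tune = tune * (d // len(tune) + 1)
--     return tune[:d], d, song
--
-- def solution(m, musicinfos):
--     # Scan the tracks BACK TO FRONT keeping a running best; update on
--     # duration >= best, so the earliest track wins duration ties exactly
--     # like A's (duration, -index) descending sort. No lists, no sort.
--     target = normalize(m)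
--     best_d, best_song = None, None
--     for info in reversed(musicinfos):
--         tune, d, song = played(info)
--         if target in tune and (best_d is None or d >= best_d):
--             best_d, best_song = d, song
--     return best_song if best_song is not None else "(None)"
-- ===== Notes on version B (the rewrite author's own statement) =====
-- stated objective: simpler
-- what changed: Replaces A's two intermediate lists plus a final sort-and-take-head with a single backward scan keeping a running best (update on duration >= best while scanning back to front, so the earliest track wins ties exactly like A's (duration,-index) descending sort); helpers are also restructured (replacement-pair loop, index-based time parse).
import Mathlib
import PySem

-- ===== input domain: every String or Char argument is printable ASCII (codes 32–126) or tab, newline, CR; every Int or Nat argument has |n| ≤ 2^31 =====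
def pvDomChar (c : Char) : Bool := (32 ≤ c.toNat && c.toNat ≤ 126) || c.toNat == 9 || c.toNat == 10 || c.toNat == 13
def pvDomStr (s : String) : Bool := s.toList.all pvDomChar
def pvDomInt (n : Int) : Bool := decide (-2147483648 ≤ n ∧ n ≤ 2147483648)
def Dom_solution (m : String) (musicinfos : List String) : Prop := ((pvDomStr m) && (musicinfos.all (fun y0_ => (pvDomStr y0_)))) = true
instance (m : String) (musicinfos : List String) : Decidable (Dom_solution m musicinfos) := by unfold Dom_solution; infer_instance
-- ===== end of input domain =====

-- B replaces A's two intermediate lists and final sort-and-take-head by one backward scan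
-- with a running best (duration ≥ best while scanning back to front keeps the earliest
-- track on duration ties); objective: simpler.

-- ===== PORT A =====
-- time_convert(s): h, m = map(int, s.split(":")); h * 60 + m.  none where Python raises
-- (wrong number of ':'-fields, or int() fails).
def timeConvert (s : String) : Option Int :=
  match PySem.Str.split? s ":" with
  | some [h, mm] =>
    match PySem.Int.ofStr? h, PySem.Int.ofStr? mm with
    | some hv, some mv => some (hv * 60 + mv)
    | _, _ => none
  | _ => none

-- convert_shap(s): the chain of seven .replace calls.
def convertShap (s : String) : String :=
  PySem.Str.replace (PySem.Str.replace (PySem.Str.replace (PySem.Str.replace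
    (PySem.Str.replace (PySem.Str.replace (PySem.Str.replace s "C#" "c")
      "D#" "d") "F#" "f") "G#" "g") "A#" "a") "B#" "b") "E#" "e"

-- The body of A's first loop for one musicinfo: returns (played melody, duration, song
-- title); none exactly where Python raises (split not giving 4 fields, time_convert
-- failing, or duration//0 on an empty melody).
def procTrack (info : String) : Option (List Char × Int × String) :=
  match PySem.Str.split? info "," with
  | some [st, et, song, music0] =>
    match timeConvert st, timeConvert et with
    | some ts, some te =>
      let duration := te - ts
      let mus := (convertShap music0).toList
      if duration > (mus.length : Int) then
        if mus.isEmpty then none   -- ZeroDivisionError in Python (outside Pre_)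
        else some (PySem.List.slice
                     (PySem.List.pyRepeat mus (PySem.Int.floordiv duration (mus.length : Int) + 1))
                     none (some duration), duration, song)
      else some (PySem.List.slice mus none (some duration), duration, song)
    | _, _ => none
  | _ => none

def solution (m : String) (musicinfos : List String) : String :=
  -- arr: for i, musicinfo in enumerate(musicinfos): ... arr.append([music, duration, song, i])
  let arr : List (List Char × Int × String × Int) :=
    (PySem.List.enumerate musicinfos).foldl (fun acc p =>
      match procTrack p.2 with
      | some v => acc ++ [(v.1, v.2.1, v.2.2, p.1)]
      | none => acc) []
  let mc := (convertShap m).toList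
  -- result: for music, duration, song, index in arr: if m in music: result.append([duration, index, song])
  let result : List (Int × Int × String) :=
    arr.foldl (fun acc q =>
      if PySem.Chars.isIn mc q.1 then acc ++ [(q.2.1, q.2.2.2, q.2.2.1)] else acc) []
  -- sorted(result, key=lambda x: (x[0], -x[1]), reverse=True)[0][2] if result else "(None)"
  match PySem.List.sorted2 result (fun x => x.1) (fun x => -x.2.1) true with
  | [] => "(None)"
  | x :: _ => x.2.2

-- ===== PORT B =====
-- REPL and normalize(s): 'for old, new in REPL: s = s.replace(old, new)'.
def replPairs : List (String × String) :=
  [("C#", "c"), ("D#", "d"), ("F#", "f"), ("G#", "g"), ("A#", "a"), ("B#", "b"), ("E#", "e")]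

def normalizeB (s : String) : String :=
  replPairs.foldl (fun acc pr => PySem.Str.replace acc pr.1 pr.2) s

-- minutes(t): parts = t.split(":"); int(parts[0]) * 60 + int(parts[1]).
-- none where Python raises (IndexError on parts[0]/parts[1], or int() fails).
def minutesB (t : String) : Option Int :=
  match PySem.Str.split? t ":" with
  | some parts =>
    match PySem.List.pyGet? parts 0, PySem.List.pyGet? parts 1 with
    | some p0, some p1 =>
      match PySem.Int.ofStr? p0, PySem.Int.ofStr? p1 with
      | some hv, some mv => some (hv * 60 + mv)
      | _, _ => none
    | _, _ => none
  | none => none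

-- played(info): parse one track, expand its melody to the played prefix.
-- none exactly where Python raises.
def playedB (info : String) : Option (List Char × Int × String) :=
  match PySem.Str.split? info "," with
  | some [st, et, song, notes] =>
    match minutesB et, minutesB st with
    | some te, some ts =>
      let d := te - ts
      let tune := (normalizeB notes).toList
      if (tune.length : Int) < d then
        if tune.isEmpty then none   -- ZeroDivisionError in Python (outside Pre_)
        else some (PySem.List.slice
                     (PySem.List.pyRepeat tune (PySem.Int.floordiv d (tune.length : Int) + 1))
                     none (some d), d, song)
      else some (PySem.List.slice tune none (some d), d, song)
    | _, _ => none
  | _ => none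

def solution_alt (m : String) (musicinfos : List String) : String :=
  let target := (normalizeB m).toList
  -- for info in reversed(musicinfos): update best on 'target in tune and d >= best'
  let best : Option (Int × String) := musicinfos.reverse.foldl (fun best info =>
    match playedB info with
    | none => best   -- Python raises here; outside Pre_
    | some (tune, d, song) =>
      if PySem.Chars.isIn target tune &&
         (match best with | none => true | some b => decide (d ≥ b.1))
      then some (d, song) else best) none
  match best with
  | none => "(None)"
  | some b => b.2

-- ===== PRECONDITION & SPEC =====
-- Pre_ excludes exactly the inputs where the Python raises: a musicinfo without exactly
-- four ','-fields, a time that is not "int:int", or an empty (after convert_shap) melody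
-- together with a positive duration (ZeroDivisionError in duration // len(music)).
def preTrack (info : String) : Bool :=
  match PySem.Str.split? info "," with
  | some [st, et, _, music0] =>
    match timeConvert st, timeConvert et with
    | some ts, some te => !(convertShap music0).toList.isEmpty || decide (te - ts ≤ 0)
    | _, _ => false
  | _ => false

def Pre_solution (m : String) (musicinfos : List String) : Prop :=
  ∀ info ∈ musicinfos, preTrack info = true
instance (m : String) (musicinfos : List String) : Decidable (Pre_solution m musicinfos) := by
  unfold Pre_solution; infer_instance

def pvWitness_solution : String × List String :=
  ("ABC", ["10:00,10:03,HELLO,ABCDEF", "10:00,10:05,WORLD,ABC"])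

def Spec_solution (m : String) (musicinfos : List String) (out : String) : Prop := out = solution_alt m musicinfos
instance (m : String) (musicinfos : List String) (out : String) : Decidable (Spec_solution m musicinfos out) := by unfold Spec_solution; infer_instance

-- ===== CLAIM (what is proved, stated in full; the proofs are below) =====
def Claim_equal_solution : Prop := ∀ (m : String) (musicinfos : List String), Dom_solution m musicinfos → Pre_solution m musicinfos → Spec_solution m musicinfos (solution m musicinfos)

-- ===== LEMMAS AND PROOFS =====

-- B's helpers agree with A's where A returns
lemma normalizeB_eq (s : String) : normalizeB s = convertShap s := by
  simp [normalizeB, replPairs, convertShap]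

lemma minutesB_of_timeConvert (s : String) (v : Int) (h : timeConvert s = some v) :
    minutesB s = some v := by
  unfold timeConvert at h
  unfold minutesB
  cases hs : PySem.Str.split? s ":" with
  | none => rw [hs] at h; simp at h
  | some parts =>
    rw [hs] at h
    match parts with
    | [] => simp at h
    | [a] => simp at h
    | a :: b :: c :: t => simp at h
    | [a, b] => exact h

-- the per-track bodies of B and A agree once both times parse
lemma trackBody_eq (st et song notes : String) (ts te : Int)
    (hst : timeConvert st = some ts) (het : timeConvert et = some te) :
    (match minutesB et, minutesB st with
     | some te', some ts' =>
       let d := te' - ts'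
       let tune := (normalizeB notes).toList
       if (tune.length : Int) < d then
         if tune.isEmpty then none
         else some (PySem.List.slice
                      (PySem.List.pyRepeat tune (PySem.Int.floordiv d (tune.length : Int) + 1))
                      none (some d), d, song)
       else some (PySem.List.slice tune none (some d), d, song)
     | _, _ => none)
    = (match timeConvert st, timeConvert et with
       | some ts', some te' =>
         let duration := te' - ts'
         let mus := (convertShap notes).toList
         if duration > (mus.length : Int) then
           if mus.isEmpty then none
           else some (PySem.List.slice
                        (PySem.List.pyRepeat mus (PySem.Int.floordiv duration (mus.length : Int) + 1))
                        none (some duration), duration, song)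
         else some (PySem.List.slice mus none (some duration), duration, song)
       | _, _ => none) := by
  rw [minutesB_of_timeConvert st ts hst, minutesB_of_timeConvert et te het, hst, het]
  simp only [normalizeB_eq, gt_iff_lt]

lemma playedB_eq_procTrack (info : String) (h : preTrack info = true) :
    playedB info = procTrack info := by
  unfold preTrack at h
  unfold playedB procTrack
  cases hs : PySem.Str.split? info "," with
  | none => simp [hs] at h
  | some parts =>
    rw [hs] at h
    match parts with
    | [st, et, song, music0] =>
      have h' : (match timeConvert st, timeConvert et with
                 | some ts, some te =>
                   !(convertShap music0).toList.isEmpty || decide (te - ts ≤ 0)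
                 | _, _ => false) = true := h
      cases hst : timeConvert st with
      | none =>
        rw [hst] at h'
        cases het : timeConvert et <;> rw [het] at h' <;> exact Bool.noConfusion h'
      | some ts =>
        cases het : timeConvert et with
        | none => rw [hst, het] at h'; exact Bool.noConfusion h'
        | some te => exact trackBody_eq st et song music0 ts te hst het
    | [] => simp at h
    | [a] => simp at h
    | [a, b] => simp at h
    | [a, b, c] => simp at h
    | a :: b :: c :: d :: e :: t => simp at h

-- A's per-track body returns a value once preTrack's conditions hold
lemma trackBody_some (st et song notes : String) (ts te : Int)
    (hst : timeConvert st = some ts) (het : timeConvert et = some te)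
    (hok : (!(convertShap notes).toList.isEmpty || decide (te - ts ≤ 0)) = true) :
    ∃ v, (match timeConvert st, timeConvert et with
       | some ts', some te' =>
         let duration := te' - ts'
         let mus := (convertShap notes).toList
         if duration > (mus.length : Int) then
           if mus.isEmpty then none
           else some (PySem.List.slice
                        (PySem.List.pyRepeat mus (PySem.Int.floordiv duration (mus.length : Int) + 1))
                        none (some duration), duration, song)
         else some (PySem.List.slice mus none (some duration), duration, song)
       | _, _ => none) = some v := by
  rw [hst, het]
  simp only [Bool.or_eq_true, Bool.not_eq_true', decide_eq_true_eq] at hok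
  by_cases hd : te - ts > (((convertShap notes).toList.length : Int))
  · rcases hok with hok | hok
    · simp only []
      rw [if_pos hd, if_neg (by simp [hok])]
      exact ⟨_, rfl⟩
    · exfalso
      have hnn : (0 : Int) ≤ ((convertShap notes).toList.length : Int) := Int.natCast_nonneg _
      omega
  · simp only []
    rw [if_neg hd]
    exact ⟨_, rfl⟩

lemma preTrack_procTrack_some (info : String) (h : preTrack info = true) :
    ∃ v, procTrack info = some v := by
  unfold preTrack at h
  unfold procTrack
  cases hs : PySem.Str.split? info "," with
  | none => simp [hs] at h
  | some parts =>
    rw [hs] at h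
    match parts with
    | [st, et, song, music0] =>
      have h' : (match timeConvert st, timeConvert et with
                 | some ts, some te =>
                   !(convertShap music0).toList.isEmpty || decide (te - ts ≤ 0)
                 | _, _ => false) = true := h
      cases hst : timeConvert st with
      | none =>
        rw [hst] at h'
        cases het : timeConvert et <;> rw [het] at h' <;> exact Bool.noConfusion h'
      | some ts =>
        cases het : timeConvert et with
        | none => rw [hst, het] at h'; exact Bool.noConfusion h'
        | some te =>
          rw [hst] at h'; rw [het] at h'
          exact trackBody_some st et song music0 ts te hst het h'
    | [] => simp at h
    | [a] => simp at h
    | [a, b] => simp at h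
    | [a, b, c] => simp at h
    | a :: b :: c :: d :: e :: t => simp at h

-- first element of maximal duration (later elements replace only on strictly greater .1)
def fm : List (Int × Int × String) → Option (Int × Int × String)
  | [] => none
  | x :: t => match fm t with
    | none => some x
    | some y => if x.1 < y.1 then some y else some x

def fmP : List (Int × String) → Option (Int × String)
  | [] => none
  | x :: t => match fmP t with
    | none => some x
    | some y => if x.1 < y.1 then some y else some x

-- candidates with their enumerate index, in track order
def kc (mc : List Char) : List (Int × String) → List (Int × Int × String)
  | [] => []
  | p :: rest =>
    match procTrack p.2 with
    | some v => if PySem.Chars.isIn mc v.1 then (v.2.1, p.1, v.2.2) :: kc mc rest else kc mc rest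
    | none => kc mc rest

-- candidates without indices, in track order
def cands (mc : List Char) : List String → List (Int × String)
  | [] => []
  | info :: rest =>
    match procTrack info with
    | some v => if PySem.Chars.isIn mc v.1 then (v.2.1, v.2.2) :: cands mc rest else cands mc rest
    | none => cands mc rest

-- A's first loop (append with an Option match) as a filterMap
def arrMap (l : List (Int × String)) : List (List Char × Int × String × Int) :=
  l.filterMap (fun p => (procTrack p.2).map (fun v => (v.1, v.2.1, v.2.2, p.1)))

lemma arr_foldl (l : List (Int × String)) (acc : List (List Char × Int × String × Int)) :
    l.foldl (fun acc p =>
      match procTrack p.2 with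
      | some v => acc ++ [(v.1, v.2.1, v.2.2, p.1)]
      | none => acc) acc = acc ++ arrMap l := by
  induction l generalizing acc with
  | nil => simp [arrMap]
  | cons p rest ih =>
    cases h : procTrack p.2 with
    | none => simp [List.foldl_cons, h, ih, arrMap]
    | some v => simp [List.foldl_cons, h, ih, arrMap]

-- A's result list equals kc over the enumerate list
lemma result_eq_kc (mc : List Char) (l : List (Int × String)) :
    ((arrMap l).filter (fun q => PySem.Chars.isIn mc q.1)).map
        (fun q => (q.2.1, q.2.2.2, q.2.2.1)) = kc mc l := by
  induction l with
  | nil => simp [arrMap, kc]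
  | cons p rest ih =>
    cases h : procTrack p.2 with
    | none => simp [arrMap, kc, h] at ih ⊢; exact ih
    | some v =>
      by_cases hin : PySem.Chars.isIn mc v.1
      · simp [arrMap, kc, h, hin] at ih ⊢; exact ih
      · simp [arrMap, kc, h, hin] at ih ⊢; exact ih

-- cands distributes over append / commutes with reverse
lemma cands_append (mc : List Char) (l1 l2 : List String) :
    cands mc (l1 ++ l2) = cands mc l1 ++ cands mc l2 := by
  induction l1 with
  | nil => simp [cands]
  | cons info rest ih =>
    cases h : procTrack info with
    | none => simp [cands, h, ih]
    | some v =>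
      by_cases hin : PySem.Chars.isIn mc v.1
      · simp [cands, h, hin, ih]
      · simp [cands, h, hin, ih]

lemma cands_reverse (mc : List Char) (l : List String) :
    cands mc l.reverse = (cands mc l).reverse := by
  induction l with
  | nil => simp [cands]
  | cons info rest ih =>
    rw [List.reverse_cons, cands_append, ih]
    cases h : procTrack info with
    | none => simp [cands, h]
    | some v =>
      by_cases hin : PySem.Chars.isIn mc v.1
      · simp [cands, h, hin]
      · simp [cands, h, hin]

-- B's fold over a list of tracks is the pure best-fold over its candidate list
lemma b_foldl (mc : List Char) (l : List String) (h : ∀ info ∈ l, preTrack info = true)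
    (b : Option (Int × String)) :
    l.foldl (fun best info =>
      match playedB info with
      | none => best
      | some (tune, d, song) =>
        if PySem.Chars.isIn mc tune &&
           (match best with | none => true | some bd => decide (d ≥ bd.1))
        then some (d, song) else best) b
    = (cands mc l).foldl (fun best q =>
        if (match best with | none => true | some bd => decide (q.1 ≥ bd.1))
        then some q else best) b := by
  induction l generalizing b with
  | nil => simp [cands]
  | cons info rest ih =>
    have hi : preTrack info = true := h info (List.mem_cons_self ..)
    have hrest : ∀ x ∈ rest, preTrack x = true := fun x hx => h x (List.mem_cons_of_mem _ hx)
    obtain ⟨v, hv⟩ := preTrack_procTrack_some info hi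
    have hpb : playedB info = some v := by rw [playedB_eq_procTrack info hi, hv]
    obtain ⟨tune, d, song⟩ := v
    by_cases hin : PySem.Chars.isIn mc tune
    · simp only [List.foldl_cons, cands, hv, hpb, hin, Bool.true_and, if_pos]
      rcases b with _ | bd
      · simp only []; exact ih hrest _
      · by_cases hc : d ≥ bd.1
        · simp only [hc, decide_true, if_pos]; exact ih hrest _
        · simp only [hc, decide_false, Bool.false_eq_true, if_false]; exact ih hrest _
    · simp only [List.foldl_cons, cands, hv, hpb, hin, Bool.false_and, Bool.false_eq_true,
        if_false]
      exact ih hrest b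

-- the reverse best-fold (update on ≥) computes fmP of the original order
lemma rev_best_foldl (l : List (Int × String)) :
    l.reverse.foldl (fun best q =>
        if (match best with | none => true | some bd => decide (q.1 ≥ bd.1))
        then some q else best) none
    = fmP l := by
  rw [List.foldl_reverse]
  induction l with
  | nil => simp [fmP]
  | cons x t ih =>
    rw [List.foldr_cons, ih]
    cases hf : fmP t with
    | none => simp [fmP, hf]
    | some y =>
      by_cases h : x.1 < y.1
      · simp [fmP, hf, h, show ¬ x.1 ≥ y.1 by omega]
      · simp [fmP, hf, h, show x.1 ≥ y.1 by omega]

-- cands is kc with the indices forgotten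
lemma cands_eq_kc_map (mc : List Char) (l : List String) (s : Int) :
    (kc mc (PySem.List.enumerate l s)).map (fun t => (t.1, t.2.2)) = cands mc l := by
  induction l generalizing s with
  | nil => simp [PySem.List.enumerate, kc, cands]
  | cons info rest ih =>
    rw [PySem.List.enumerate_cons]
    cases h : procTrack info with
    | none => simp [kc, cands, h, ih]
    | some v =>
      by_cases hin : PySem.Chars.isIn mc v.1
      · simp [kc, cands, h, hin, ih]
      · simp [kc, cands, h, hin, ih]

-- fm commutes with forgetting the index
lemma fmP_map (r : List (Int × Int × String)) :
    fmP (r.map (fun t => (t.1, t.2.2))) = (fm r).map (fun t => (t.1, t.2.2)) := by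
  induction r with
  | nil => simp [fm, fmP]
  | cons x t ih =>
    simp only [List.map_cons, fmP, fm, ih]
    cases hf : fm t with
    | none => simp
    | some y => by_cases h : x.1 < y.1 <;> simp [h]

-- every index in kc (enumerate l s) is ≥ s
lemma kc_idx_ge (mc : List Char) (l : List String) (s : Int) :
    ∀ q ∈ kc mc (PySem.List.enumerate l s), s ≤ q.2.1 := by
  induction l generalizing s with
  | nil => simp [PySem.List.enumerate, kc]
  | cons info rest ih =>
    rw [PySem.List.enumerate_cons]
    intro q hq
    cases h : procTrack info with
    | none =>
      simp only [kc, h] at hq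
      have := ih (s + 1) q hq; omega
    | some v =>
      by_cases hin : PySem.Chars.isIn mc v.1
      · simp only [kc, h, hin, if_pos] at hq
        rcases List.mem_cons.mp hq with rfl | hq
        · simp
        · have := ih (s + 1) q hq; omega
      · simp only [kc, h, hin] at hq
        have := ih (s + 1) q hq; omega

-- the indices along kc (enumerate l s) are strictly increasing
lemma kc_idx_pairwise (mc : List Char) (l : List String) (s : Int) :
    (kc mc (PySem.List.enumerate l s)).Pairwise (fun a b => a.2.1 < b.2.1) := by
  induction l generalizing s with
  | nil => simp [PySem.List.enumerate, kc]
  | cons info rest ih =>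
    rw [PySem.List.enumerate_cons]
    cases h : procTrack info with
    | none => simp only [kc, h]; exact ih (s + 1)
    | some v =>
      by_cases hin : PySem.Chars.isIn mc v.1
      · simp only [kc, h, hin, if_pos]
        refine List.Pairwise.cons (fun q hq => ?_) (ih (s + 1))
        have := kc_idx_ge mc rest (s + 1) q hq
        simp; omega
      · simp only [kc, h, hin]; exact ih (s + 1)

-- basic facts about fm
lemma fm_none_iff (r : List (Int × Int × String)) : fm r = none ↔ r = [] := by
  cases r with
  | nil => simp [fm]
  | cons x t =>
    simp only [fm]
    cases fm t with
    | none => simp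
    | some y => by_cases h : x.1 < y.1 <;> simp [h]

lemma fm_mem (r : List (Int × Int × String)) (f : Int × Int × String) :
    fm r = some f → f ∈ r := by
  induction r with
  | nil => simp [fm]
  | cons x t ih =>
    simp only [fm]
    cases hf : fm t with
    | none => intro h; simp at h; simp [h]
    | some y =>
      by_cases h : x.1 < y.1
      · simp only [h, if_pos]
        intro he; simp at he; subst he
        exact List.mem_cons_of_mem _ (ih hf)
      · simp only [h, if_false]
        intro he; simp at he; simp [he]

lemma fm_max (r : List (Int × Int × String)) (f : Int × Int × String)
    (hp : r.Pairwise (fun a b => a.2.1 < b.2.1)) (hf : fm r = some f) :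
    ∀ y ∈ r, y.1 < f.1 ∨ (y.1 = f.1 ∧ f.2.1 ≤ y.2.1) := by
  induction r generalizing f with
  | nil => simp [fm] at hf
  | cons x t ih =>
    have hx : ∀ z ∈ t, x.2.1 < z.2.1 := fun z hz => List.rel_of_pairwise_cons hp hz
    have hp' := hp.of_cons
    simp only [fm] at hf
    cases ht : fm t with
    | none =>
      rw [ht] at hf; simp at hf; subst hf
      have : t = [] := (fm_none_iff t).mp ht
      subst this
      intro y hy; simp at hy; subst hy; right; omega
    | some y0 =>
      rw [ht] at hf
      have ihy := ih y0 hp' ht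
      by_cases h : x.1 < y0.1
      · simp only [h, if_true] at hf
        injection hf with hf; subst hf
        intro y hy
        rcases List.mem_cons.mp hy with rfl | hy
        · left; exact h
        · exact ihy y hy
      · simp only [h, if_false] at hf
        injection hf with hf; subst hf
        intro y hy
        rcases List.mem_cons.mp hy with rfl | hy
        · right; omega
        · rcases ihy y hy with h1 | ⟨h1, h2⟩
          · left; omega
          · by_cases h3 : y.1 < x.1
            · left; exact h3
            · right; exact ⟨by omega, le_of_lt (hx y hy)⟩

-- in a list with strictly increasing indices the index determines the element
lemma idx_inj (r : List (Int × Int × String))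
    (hp : r.Pairwise (fun a b => a.2.1 < b.2.1)) (x f : Int × Int × String)
    (hx : x ∈ r) (hf : f ∈ r) (he : x.2.1 = f.2.1) : x = f := by
  induction r with
  | nil => simp at hx
  | cons a t ih =>
    have ha : ∀ z ∈ t, a.2.1 < z.2.1 := fun z hz => List.rel_of_pairwise_cons hp hz
    rcases List.mem_cons.mp hx with hx1 | hx1
    · rcases List.mem_cons.mp hf with hf1 | hf1
      · rw [hx1, hf1]
      · exfalso; rw [hx1] at he; have := ha f hf1; omega
    · rcases List.mem_cons.mp hf with hf1 | hf1
      · exfalso; rw [hf1] at he; have := ha x hx1; omega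
      · exact ih hp.of_cons hx1 hf1

-- the descending-lex order used by sorted(..., key=(d, -i), reverse=True)
def Rdl (a b : Int × Int × String) : Prop := b.1 < a.1 ∨ (b.1 = a.1 ∧ a.2.1 ≤ b.2.1)

lemma insertBy_pairwise_Rdl (before : (Int × Int × String) → (Int × Int × String) → Bool)
    (hbt : ∀ a b, before a b = true → Rdl a b)
    (hbf : ∀ a b, before a b = false → Rdl b a)
    (x : Int × Int × String) (ys : List (Int × Int × String))
    (h : ys.Pairwise Rdl) : (PySem.List.insertBy before x ys).Pairwise Rdl := by
  induction ys with
  | nil => simp [PySem.List.insertBy]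
  | cons y t ih =>
    simp only [PySem.List.insertBy]
    by_cases hb : before x y
    · rw [if_pos hb]
      refine List.Pairwise.cons (fun z hz => ?_) h
      rcases List.mem_cons.mp hz with rfl | hz
      · exact hbt _ _ hb
      · have h1 := hbt _ _ hb
        have h2 := List.rel_of_pairwise_cons h hz
        unfold Rdl at *; omega
    · rw [if_neg (by simp [hb])]
      refine List.Pairwise.cons (fun z hz => ?_) (ih h.of_cons)
      rcases (PySem.List.mem_insertBy before x z t).mp hz with rfl | hz
      · exact hbf _ _ (by simpa using hb)
      · exact List.rel_of_pairwise_cons h hz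

lemma sorted2_pairwise_Rdl (r : List (Int × Int × String)) :
    (PySem.List.sorted2 r (fun x => x.1) (fun x => -x.2.1) true).Pairwise Rdl := by
  unfold PySem.List.sorted2
  simp only []
  have hbt : ∀ a b : Int × Int × String,
      (decide (b.1 < a.1) || (!decide (a.1 < b.1) && decide (-b.2.1 < -a.2.1))) = true →
      Rdl a b := by
    intro a b h; simp at h; unfold Rdl; omega
  have hbf : ∀ a b : Int × Int × String,
      (decide (b.1 < a.1) || (!decide (a.1 < b.1) && decide (-b.2.1 < -a.2.1))) = false →
      Rdl b a := by
    intro a b h; simp at h; unfold Rdl; omega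
  have main : ∀ (l acc : List (Int × Int × String)), acc.Pairwise Rdl →
      (l.foldl (fun acc x => PySem.List.insertBy
        (fun a b => decide (b.1 < a.1) || (!decide (a.1 < b.1) && decide (-b.2.1 < -a.2.1)))
        x acc) acc).Pairwise Rdl := by
    intro l
    induction l with
    | nil => intro acc h; simpa using h
    | cons x t ih =>
      intro acc h
      simp only [List.foldl_cons]
      exact ih _ (insertBy_pairwise_Rdl _ hbt hbf x acc h)
  exact main r [] List.Pairwise.nil

lemma sorted2_head (r : List (Int × Int × String)) (x : Int × Int × String)
    (t : List (Int × Int × String))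
    (hs : PySem.List.sorted2 r (fun x => x.1) (fun x => -x.2.1) true = x :: t) :
    x ∈ r ∧ ∀ y ∈ r, Rdl x y := by
  have hperm := PySem.List.sorted2_perm r (fun x => x.1) (fun x => -x.2.1) true
  rw [hs] at hperm
  constructor
  · exact hperm.mem_iff.mp (List.mem_cons_self ..)
  · intro y hy
    rcases List.mem_cons.mp (hperm.mem_iff.mpr hy) with rfl | hy'
    · unfold Rdl; omega
    · have hp := sorted2_pairwise_Rdl r
      rw [hs] at hp
      exact List.rel_of_pairwise_cons hp hy'

-- A's sorted-head selection is fm, on any index-increasing list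
lemma A_head_eq_fm (r : List (Int × Int × String))
    (hp : r.Pairwise (fun a b => a.2.1 < b.2.1)) :
    (match PySem.List.sorted2 r (fun x => x.1) (fun x => -x.2.1) true with
     | [] => "(None)"
     | x :: _ => x.2.2)
    = (match fm r with | none => "(None)" | some f => f.2.2) := by
  cases hs : PySem.List.sorted2 r (fun x => x.1) (fun x => -x.2.1) true with
  | nil =>
    have hperm := PySem.List.sorted2_perm r (fun x => x.1) (fun x => -x.2.1) true
    rw [hs] at hperm
    have : r = [] := hperm.symm.eq_nil
    subst this
    simp [fm]
  | cons x t =>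
    obtain ⟨hxr, hmax⟩ := sorted2_head r x t hs
    cases hf : fm r with
    | none =>
      rw [fm_none_iff] at hf; subst hf; simp at hxr
    | some f =>
      have hfr := fm_mem r f hf
      have h1 := hmax f hfr
      have h2 := fm_max r f hp hf x hxr
      have hxf : x = f := by
        apply idx_inj r hp x f hxr hfr
        unfold Rdl at h1; omega
      rw [hxf]

theorem solution_spec : Claim_equal_solution := by
  intro m musicinfos _hdom hpre
  unfold Spec_solution solution solution_alt
  simp only [arr_foldl, List.nil_append, PySem.List.foldl_append_if, result_eq_kc]
  rw [normalizeB_eq,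
      b_foldl ((convertShap m).toList) musicinfos.reverse
        (fun info hi => hpre info (List.mem_reverse.mp hi)) none,
      cands_reverse, rev_best_foldl,
      ← cands_eq_kc_map ((convertShap m).toList) musicinfos 0, fmP_map,
      A_head_eq_fm _ (kc_idx_pairwise _ _ _)]
  cases fm (kc (convertShap m).toList (PySem.List.enumerate musicinfos 0)) <;> simp
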